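-- pv_equiv track=rewrite | github.com/SkyVex12/visual-relative-images | detect.py | merge_contiguous_columns
-- ===== SOURCE A (Python) =====
-- def merge_contiguous_columns(cols):
--     """Turn sorted column indices into contiguous (start, end) ranges."""
--     ranges = []
--     if len(cols) == 0:
--         return ranges
--
--     start = cols[0]
--     prev = cols[0]
--     for v in cols[1:]:
--         if v == prev + 1:
--             prev = v
--         else:
--             ranges.append((start, prev))
--             start = v
--             prev = v
--     ranges.append((start, prev))
--     return ranges
-- ===== SOURCE B (Python) =====
-- def merge_contiguous_columns(cols):
--     """Turn sorted column indices into contiguous (start, end) ranges."""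
--     n = len(cols)
--     starts = [v for i, v in enumerate(cols) if i == 0 or cols[i - 1] + 1 != v]
--     ends = [v for i, v in enumerate(cols) if i == n - 1 or cols[i + 1] != v + 1]
--     return list(zip(starts, ends))
-- ===== Notes on version B (the rewrite author's own statement) =====
-- stated objective: alternative
-- what changed: B replaces A's stateful single pass (start/prev accumulators, conditional appends) by two staged, stateless comprehensions over enumerate(cols) that select the run boundaries (starts: index 0 or predecessor not value-1; ends: last index or successor not value+1) and zips them into the range list.
import Mathlib
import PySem

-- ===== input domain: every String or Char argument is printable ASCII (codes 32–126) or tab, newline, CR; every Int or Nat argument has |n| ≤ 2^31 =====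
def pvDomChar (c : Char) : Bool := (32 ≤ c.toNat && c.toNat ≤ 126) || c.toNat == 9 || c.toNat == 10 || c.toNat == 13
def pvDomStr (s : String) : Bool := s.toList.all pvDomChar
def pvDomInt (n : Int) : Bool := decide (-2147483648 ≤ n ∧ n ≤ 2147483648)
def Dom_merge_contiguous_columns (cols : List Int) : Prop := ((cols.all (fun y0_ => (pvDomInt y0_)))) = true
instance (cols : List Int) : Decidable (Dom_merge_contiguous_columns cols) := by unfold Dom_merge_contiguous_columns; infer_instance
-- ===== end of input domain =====

-- B replaces A's stateful forward scan by two staged comprehensions that pick out the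
-- run boundaries (starts: first element or predecessor not one less; ends: last element
-- or successor not one more) and zips them; same values, no speed claim.

-- ===== PORT A =====
-- A: forward loop over cols[1:] carrying (ranges, start, prev); appends closed ranges.
def merge_contiguous_columns (cols : List Int) : List (Int × Int) :=
  match cols with
  | [] => []
  | c :: rest =>
    let st := rest.foldl
      (fun (st : List (Int × Int) × Int × Int) v =>
        let (ranges, start, prev) := st
        if v = prev + 1 then (ranges, start, v)
        else (ranges ++ [(start, prev)], v, v))
      ([], c, c)
    st.1 ++ [(st.2.1, st.2.2)]

-- ===== PORT B =====
-- B: starts/ends as filtered comprehensions over enumerate(cols), zipped.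
-- cols[i-1] / cols[i+1] are only evaluated in Python when in range (short-circuit `or`),
-- so pyGetD's default 0 is never the value used.
def merge_contiguous_columns_alt (cols : List Int) : List (Int × Int) :=
  let n : Int := (cols.length : Int)
  let starts := ((PySem.List.enumerate cols 0).filter
      (fun p => p.1 == 0 || !(PySem.List.pyGetD cols (p.1 - 1) 0 + 1 == p.2))).map (·.2)
  let ends := ((PySem.List.enumerate cols 0).filter
      (fun p => p.1 == n - 1 || !(PySem.List.pyGetD cols (p.1 + 1) 0 == p.2 + 1))).map (·.2)
  starts.zip ends

-- ===== PRECONDITION & SPEC =====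
def Spec_merge_contiguous_columns (cols : List Int) (out : List (Int × Int)) : Prop := out = merge_contiguous_columns_alt cols
instance (cols : List Int) (out : List (Int × Int)) : Decidable (Spec_merge_contiguous_columns cols out) := by unfold Spec_merge_contiguous_columns; infer_instance

-- ===== CLAIM (what is proved, stated in full; the proofs are below) =====
def Claim_equal_merge_contiguous_columns : Prop := ∀ (cols : List Int), Dom_merge_contiguous_columns cols → Spec_merge_contiguous_columns cols (merge_contiguous_columns cols)

-- ===== LEMMAS AND PROOFS =====

-- Common reference: the run-merging recursion.
def pvMerge (start prev : Int) : List Int → List (Int × Int)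
  | [] => [(start, prev)]
  | v :: r => if v = prev + 1 then pvMerge start v r else (start, prev) :: pvMerge v v r

-- Run starts strictly after a previous element `prev`.
def bStarts (prev : Int) : List Int → List Int
  | [] => []
  | v :: r => if v = prev + 1 then bStarts v r else v :: bStarts v r

-- Run ends from a current element `p` onwards.
def bEnds (p : Int) : List Int → List Int
  | [] => [p]
  | v :: r => if v = p + 1 then bEnds v r else p :: bEnds v r

theorem pvMerge_foldl (l : List Int) : ∀ (acc : List (Int × Int)) (s p : Int),
    (let st := l.foldl
      (fun (st : List (Int × Int) × Int × Int) v =>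
        let (ranges, start, prev) := st
        if v = prev + 1 then (ranges, start, v)
        else (ranges ++ [(start, prev)], v, v))
      (acc, s, p)
    st.1 ++ [(st.2.1, st.2.2)]) = acc ++ pvMerge s p l := by
  induction l with
  | nil => intro acc s p; simp [pvMerge]
  | cons v r ih =>
    intro acc s p
    by_cases h : v = p + 1
    · simp [List.foldl_cons, h, pvMerge, ih]
    · simp [List.foldl_cons, h, pvMerge, ih]

theorem merge_A_eq_pvMerge (c : Int) (rest : List Int) :
    merge_contiguous_columns (c :: rest) = pvMerge c c rest := by
  have := pvMerge_foldl rest [] c c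
  simpa [merge_contiguous_columns] using this

theorem zip_bStarts_bEnds (l : List Int) : ∀ (s p : Int),
    (s :: bStarts p l).zip (bEnds p l) = pvMerge s p l := by
  induction l with
  | nil => intro s p; simp [bStarts, bEnds, pvMerge]
  | cons v r ih =>
    intro s p
    by_cases h : v = p + 1 <;> simp [bStarts, bEnds, pvMerge, h, ih]

-- The starts-comprehension, restricted to a suffix l of cols preceded by prev.
theorem starts_suffix (cols : List Int) : ∀ (l pre : List Int) (prev : Int),
    cols = pre ++ l → pre.getLast? = some prev →
    ((PySem.List.enumerate l (pre.length : Int)).filter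
        (fun p => p.1 == 0 || !(PySem.List.pyGetD cols (p.1 - 1) 0 + 1 == p.2))).map (·.2)
      = bStarts prev l := by
  intro l
  induction l with
  | nil => intro pre prev _ _; simp [bStarts]
  | cons v r ih =>
    intro pre prev hc hl
    have hpre : pre ≠ [] := by intro h; simp [h] at hl
    have hlen : 0 < pre.length := List.length_pos_of_ne_nil hpre
    have hidx : (pre.length : Int) - 1 = ((pre.length - 1 : Nat) : Int) := by omega
    have hget : PySem.List.pyGetD cols ((pre.length : Int) - 1) 0 = prev := by
      rw [hidx, PySem.List.pyGetD_natCast, hc, List.getD_append _ _ _ _ (by omega)]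
      rw [List.getLast?_eq_getElem?] at hl
      simp [List.getD_eq_getElem?_getD, hl]
    have htail := ih (pre ++ [v]) v (by simp [hc]) (by simp)
    have hlen2 : ((pre ++ [v]).length : Int) = (pre.length : Int) + 1 := by simp
    have h0 : (((pre.length : Int)) == 0) = false := by simp; omega
    rw [PySem.List.enumerate_cons]
    by_cases h : v = prev + 1
    · rw [List.filter_cons_of_neg (by simp [h0, hget, h])]
      simp only [bStarts, if_pos h]
      rw [← hlen2]; exact htail
    · rw [List.filter_cons_of_pos (by simp [h0, hget]; exact fun hv => h hv.symm)]
      simp only [bStarts, if_neg h, List.map_cons]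
      rw [← hlen2, htail]

-- The ends-comprehension, restricted to the suffix p :: r of cols.
theorem ends_suffix (cols : List Int) : ∀ (r pre : List Int) (p : Int),
    cols = pre ++ p :: r →
    ((PySem.List.enumerate (p :: r) (pre.length : Int)).filter
        (fun q => q.1 == (cols.length : Int) - 1 || !(PySem.List.pyGetD cols (q.1 + 1) 0 == q.2 + 1))).map (·.2)
      = bEnds p r := by
  intro r
  induction r with
  | nil =>
    intro pre p hc
    have hn : (cols.length : Int) = (pre.length : Int) + 1 := by simp [hc]
    simp [bEnds, hn]
  | cons v r' ih =>
    intro pre p hc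
    have hn : (cols.length : Int) = (pre.length : Int) + (r'.length : Int) + 2 := by
      simp [hc]; omega
    have hget : PySem.List.pyGetD cols ((pre.length : Int) + 1) 0 = v := by
      have : ((pre.length : Int) + 1) = ((pre.length + 1 : Nat) : Int) := by omega
      rw [this, PySem.List.pyGetD_natCast, hc,
        List.getD_append_right _ _ _ _ (by omega)]
      simp
    have htail := ih (pre ++ [p]) v (by simp [hc])
    have hlen2 : ((pre ++ [p]).length : Int) = (pre.length : Int) + 1 := by simp
    have h0 : (((pre.length : Int)) == (cols.length : Int) - 1) = false := by
      simp [hn]; omega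
    rw [PySem.List.enumerate_cons]
    by_cases h : v = p + 1
    · rw [List.filter_cons_of_neg (by simp [h0, hget, h])]
      simp only [bEnds, if_pos h]
      rw [← hlen2]; exact htail
    · rw [List.filter_cons_of_pos (by simp [h0, hget]; exact h)]
      simp only [bEnds, if_neg h, List.map_cons]
      rw [← hlen2, htail]

theorem merge_B_eq_pvMerge (c : Int) (rest : List Int) :
    merge_contiguous_columns_alt (c :: rest) = pvMerge c c rest := by
  unfold merge_contiguous_columns_alt
  have hs := starts_suffix (c :: rest) rest [c] c (by simp) (by simp)
  have he := ends_suffix (c :: rest) rest [] c (by simp)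
  norm_num at hs he
  simp only [List.length_cons]
  rw [PySem.List.enumerate_cons,
    List.filter_cons_of_pos (by simp)]
  simp only [List.map_cons, zero_add]
  rw [show ((rest.length + 1 : Nat) : Int) - 1 = (rest.length : Int) from by push_cast; ring]
  rw [hs, he]
  exact zip_bStarts_bEnds rest c c

-- ===== VERDICT (by name: the statement is the Claim_ definition above) =====
theorem merge_contiguous_columns_spec : Claim_equal_merge_contiguous_columns := by
  intro cols _
  unfold Spec_merge_contiguous_columns
  cases cols with
  | nil => rfl
  | cons c rest => rw [merge_A_eq_pvMerge, merge_B_eq_pvMerge]
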